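-- pv_equiv track=rewrite | github.com/nobutakayamauchi/RTS | scripts/rts_escalation.py | compute_evidence_level
-- ===== SOURCE A (Python) =====
-- from typing import Any, Dict, Optional, Tuple
--
-- def compute_evidence_level(snapshot_saved: bool, extra_urls: Optional[str]) -> str:
--     """
--     Level 0: internal counters only (no snapshot, no external)
--     Level 1: external reference URL (run_url etc) but no snapshot
--     Level 2: archived snapshot + hash
--     Level 3: multi-source corroborated (snapshot + >=1 extra reference URL)
--     """
--     urls = [u.strip() for u in (extra_urls or "").splitlines() if u.strip()]
--     if snapshot_saved and len(urls) >= 1: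
--         return "L3"
--     if snapshot_saved:
--         return "L2"
--     if len(urls) >= 1:
--         return "L1"
--     return "L0"
-- ===== SOURCE B (Python) =====
-- def compute_evidence_level(snapshot_saved, extra_urls):
--     has_urls = any(u.strip() for u in (extra_urls or "").splitlines())
--     return "L" + str(2 * int(bool(snapshot_saved)) + int(has_urls))
-- ===== Notes on version B (the rewrite author's own statement) =====
-- stated objective: simpler
-- what changed: Replaces the four-way if-cascade over a materialised URL list with a single any() boolean and a closed-form arithmetic encoding level = 2*snapshot + has_urls mapped to the label.
import Mathlib
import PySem

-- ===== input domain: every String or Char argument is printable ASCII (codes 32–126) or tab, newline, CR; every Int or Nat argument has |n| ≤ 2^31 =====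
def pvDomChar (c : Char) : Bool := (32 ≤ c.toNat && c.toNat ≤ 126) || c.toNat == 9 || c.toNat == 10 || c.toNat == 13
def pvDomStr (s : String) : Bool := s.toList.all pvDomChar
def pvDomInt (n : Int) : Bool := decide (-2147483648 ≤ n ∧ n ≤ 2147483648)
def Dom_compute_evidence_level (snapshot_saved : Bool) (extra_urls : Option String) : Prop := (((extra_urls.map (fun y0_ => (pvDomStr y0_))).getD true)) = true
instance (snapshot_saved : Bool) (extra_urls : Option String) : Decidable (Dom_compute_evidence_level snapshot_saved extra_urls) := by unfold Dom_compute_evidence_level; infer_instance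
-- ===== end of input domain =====

-- ===== PORT A =====
def compute_evidence_level (snapshot_saved : Bool) (extra_urls : Option String) : String :=
  let urls := ((PySem.Str.splitlines (extra_urls.getD "")).filter
      (fun u => PySem.Str.strip u ≠ "")).map PySem.Str.strip
  if snapshot_saved ∧ urls.length ≥ 1 then "L3"
  else if snapshot_saved then "L2"
  else if urls.length ≥ 1 then "L1"
  else "L0"

-- ===== PORT B =====
-- B replaces the four-way if-cascade with one any() boolean and the arithmetic encoding 2*snapshot+has_urls ("simpler")
def compute_evidence_level_alt (snapshot_saved : Bool) (extra_urls : Option String) : String :=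
  let has_urls := (PySem.Str.splitlines (extra_urls.getD "")).any
      (fun u => PySem.Str.strip u ≠ "")
  "L" ++ PySem.Int.toStr (2 * (if snapshot_saved then 1 else 0) + (if has_urls then 1 else 0))

-- ===== PRECONDITION & SPEC =====
def Spec_compute_evidence_level (snapshot_saved : Bool) (extra_urls : Option String) (out : String) : Prop := out = compute_evidence_level_alt snapshot_saved extra_urls
instance (snapshot_saved : Bool) (extra_urls : Option String) (out : String) : Decidable (Spec_compute_evidence_level snapshot_saved extra_urls out) := by unfold Spec_compute_evidence_level; infer_instance

-- ===== CLAIM (what is proved, stated in full; the proofs are below) =====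
def Claim_equal_compute_evidence_level : Prop := ∀ (snapshot_saved : Bool) (extra_urls : Option String), Dom_compute_evidence_level snapshot_saved extra_urls → Spec_compute_evidence_level snapshot_saved extra_urls (compute_evidence_level snapshot_saved extra_urls)

-- ===== LEMMAS AND PROOFS =====

-- ===== VERDICT (by name: the statement is the Claim_ definition above) =====
theorem compute_evidence_level_spec : Claim_equal_compute_evidence_level := by
  intro snapshot_saved extra_urls _
  unfold Spec_compute_evidence_level compute_evidence_level compute_evidence_level_alt
  have key : ∀ (l : List String) (p : String → Bool), (l.filter p).length ≥ 1 ↔ l.any p = true := by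
    intro l p
    rw [ge_iff_le, Nat.one_le_iff_ne_zero, Ne, List.length_eq_zero_iff, List.filter_eq_nil_iff,
      List.any_eq_true]
    push_neg
    simp
  simp only [List.length_map, key]
  cases h : (PySem.Str.splitlines (extra_urls.getD "")).any (fun u => PySem.Str.strip u ≠ "") <;>
    cases snapshot_saved <;> simp [h] <;> rfl
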